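-- pv_equiv track=rewrite | github.com/ChoSanghyuk/algorithm_record | 2020_08/0828_3.py | solution
-- ===== SOURCE A (Python) =====
-- import math
--
-- def solution(progresses, speeds):
--     myLi = [ math.ceil((100-i)/j) for i, j in zip(progresses, speeds) ]
--     count = []
--     j =0
--     for i in range(len(myLi)):
--         if myLi[i] >myLi[j]:
--             count.append(i-j)
--             j=i
--         if i ==len(myLi)-1:
--             if i==j:
--                 count.append(1)
--             else:
--                 count.append(i-j+1)
--     return count
-- ===== SOURCE B (Python) =====
-- import math
--
-- def solution(progresses, speeds):
--     # days until each job completes, as a running maximum ("release day" of each job)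
--     peak = []
--     for p, s in zip(progresses, speeds):
--         day = math.ceil((100 - p) / s)
--         peak.append(day if not peak or day > peak[-1] else peak[-1])
--     # each deployment batch is exactly one value of the release-day sequence:
--     # histogram it, counts come out in first-occurrence (= chronological) order
--     cnt = {}
--     for m in peak:
--         cnt[m] = cnt.get(m, 0) + 1
--     return list(cnt.values())
-- ===== Notes on version B (the rewrite author's own statement) =====
-- stated objective: alternative
-- what changed: B reduces the task to a frequency count: it materializes the prefix-maximum (release-day) sequence, histograms it with a dict, and returns the histogram values in key-insertion order, instead of A's group-start index pointer with index-subtraction appends and an end-of-list flush branch.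
import Mathlib
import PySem

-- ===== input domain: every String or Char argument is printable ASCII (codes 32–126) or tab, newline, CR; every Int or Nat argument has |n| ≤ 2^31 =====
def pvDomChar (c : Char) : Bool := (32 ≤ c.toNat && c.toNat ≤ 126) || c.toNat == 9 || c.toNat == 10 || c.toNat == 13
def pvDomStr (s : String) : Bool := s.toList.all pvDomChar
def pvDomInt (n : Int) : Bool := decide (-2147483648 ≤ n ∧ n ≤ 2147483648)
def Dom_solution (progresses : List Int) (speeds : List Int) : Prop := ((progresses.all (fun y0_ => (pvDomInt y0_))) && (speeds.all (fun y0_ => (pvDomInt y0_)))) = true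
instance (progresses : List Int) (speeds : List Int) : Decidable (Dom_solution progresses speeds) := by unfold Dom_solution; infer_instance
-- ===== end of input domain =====

-- B histograms the prefix-maximum sequence with a dict instead of A's group-start
-- index pointer; same O(n) cost, a different algorithm ('alternative').

-- ===== PORT A =====
-- math.ceil((100-p)/s): on |ints| ≤ 2^31 the correctly-rounded float division has error
-- below the distance of the exact quotient to the nearest integer, so the ceiling equals
-- the exact rational ceiling, which in Python integers is -((-(100-p)) // s);
-- ported with PySem.Int.floordiv (exact on that domain; s = 0 is excluded by Pre_).
def pyCeilDay (p s : Int) : Int := -(PySem.Int.floordiv (-(100 - p)) s)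

-- the index loop of A: state is the group-start pointer j and the count list
def solutionLoop (myLi : List Int) (i j : Nat) (count : List Int) : List Int :=
  if _h : i < myLi.length then
    let (j', count') :=
      if myLi.getD i 0 > myLi.getD j 0 then (i, count ++ [(i : Int) - (j : Int)])
      else (j, count)
    let count'' :=
      if i = myLi.length - 1 then
        (if i = j' then count' ++ [1] else count' ++ [(i : Int) - (j' : Int) + 1])
      else count'
    solutionLoop myLi (i + 1) j' count''
  else count
termination_by myLi.length - i
decreasing_by omega

def solution (progresses : List Int) (speeds : List Int) : List Int :=
  let myLi := (progresses.zip speeds).map (fun x => pyCeilDay x.1 x.2)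
  solutionLoop myLi 0 0 []

-- ===== PORT B =====
-- first loop of B: peak.append(day if not peak or day > peak[-1] else peak[-1]);
-- peak[-1] is PySem.List.pyGetD peak (-1) 0 — Python short-circuits 'not peak or …',
-- so peak[-1] is only reached on a non-empty peak (where pyGetD is exact)
def solution_alt (progresses : List Int) (speeds : List Int) : List Int :=
  let peak :=
    (progresses.zip speeds).foldl
      (fun (peak : List Int) x =>
        let day := pyCeilDay x.1 x.2
        peak ++ [if peak = [] ∨ day > PySem.List.pyGetD peak (-1) 0 then day
                 else PySem.List.pyGetD peak (-1) 0])
      []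
  let cnt := peak.foldl (fun (d : PySem.Dict Int Int) m => d.insert m (d.getD m 0 + 1))
      PySem.Dict.empty
  cnt.values

-- ===== PRECONDITION & SPEC =====
-- Pre_ excludes exactly the inputs where Python A raises ZeroDivisionError:
-- a zipped (progress, speed) pair with speed 0 (B raises there too).
def Pre_solution (progresses : List Int) (speeds : List Int) : Prop :=
  ∀ x ∈ progresses.zip speeds, x.2 ≠ 0
instance (progresses : List Int) (speeds : List Int) : Decidable (Pre_solution progresses speeds) := by unfold Pre_solution; infer_instance

def pvWitness_solution : List Int × List Int := ([93, 30, 55], [1, 30, 5])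

def Spec_solution (progresses : List Int) (speeds : List Int) (out : List Int) : Prop := out = solution_alt progresses speeds
instance (progresses : List Int) (speeds : List Int) (out : List Int) : Decidable (Spec_solution progresses speeds out) := by unfold Spec_solution; infer_instance

-- ===== CLAIM (what is proved, stated in full; the proofs are below) =====
def Claim_equal_solution : Prop := ∀ (progresses : List Int) (speeds : List Int), Dom_solution progresses speeds → Pre_solution progresses speeds → Spec_solution progresses speeds (solution progresses speeds)

-- ===== LEMMAS AND PROOFS =====

-- common reference for A: group the days list into maximal runs bounded by the run's first value
def goGroups (t c : Int) : List Int → List Int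
  | [] => [c]
  | y :: ys => if y > t then c :: goGroups y 1 ys else goGroups t (c + 1) ys

def groups : List Int → List Int
  | [] => []
  | x :: xs => goGroups x 1 xs

-- running maximum of a days list, seeded with m (the tail of B's peak list)
def scanMax (m : Int) : List Int → List Int
  | [] => []
  | y :: ys => (if y > m then y else m) :: scanMax (if y > m then y else m) ys

-- run counter over a nondecreasing list: current value v, current run length c
def rc (v c : Int) : List Int → List Int
  | [] => [c]
  | y :: ys => if y = v then rc v (c + 1) ys else c :: rc y 1 ys

-- first-occurrence dedup of the part of a sorted list above v
def ddg (v : Int) : List Int → List Int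
  | [] => []
  | y :: ys => if y = v then ddg v ys else y :: ddg y ys

-- ===== A-side: solutionLoop computes groups =====
theorem solutionLoop_eq_goGroups (d : List Int) :
    ∀ (n i j : Nat) (count : List Int), d.length - i = n → j ≤ i → i < d.length →
    solutionLoop d i j count =
      count ++ goGroups (d.getD j 0) ((i : Int) - (j : Int)) (d.drop i) := by
  intro n
  induction n with
  | zero => intro i j count hn hji hi; omega
  | succ n ih =>
    intro i j count hn hji hi
    have hdrop : d.drop i = d.getD i 0 :: d.drop (i + 1) := by
      rw [List.getD_eq_getElem?_getD, List.getElem?_eq_getElem hi]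
      simp [(List.drop_eq_getElem_cons hi).symm]
    rw [solutionLoop, dif_pos hi, hdrop]
    by_cases hgt : d.getD i 0 > d.getD j 0
    · rw [if_pos hgt]
      simp only [goGroups, if_pos hgt]
      by_cases hlast : i = d.length - 1
      · have hstop : i + 1 = d.length := by omega
        have hd1 : d.drop (i + 1) = [] := by simp [hstop]
        rw [if_pos hlast, solutionLoop, dif_neg (by omega)]
        simp [goGroups, hd1]
      · rw [if_neg hlast]
        have hi1 : i + 1 < d.length := by omega
        rw [ih (i + 1) i _ (by omega) (by omega) hi1]
        rw [show (((i + 1 : Nat) : Int) - (i : Int)) = 1 by push_cast; ring]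
        simp
    · rw [if_neg hgt]
      simp only [goGroups, if_neg hgt]
      by_cases hlast : i = d.length - 1
      · have hstop : i + 1 = d.length := by omega
        rw [if_pos hlast]
        have hdrop1 : d.drop (i + 1) = [] := by simp [hstop]
        by_cases hij : i = j
        · rw [if_pos hij, solutionLoop, dif_neg (by omega)]
          rw [hdrop1]
          simp [goGroups, hij]
        · rw [if_neg hij, solutionLoop, dif_neg (by omega)]
          rw [hdrop1]
          simp [goGroups]
      · rw [if_neg hlast]
        have hi1 : i + 1 < d.length := by omega
        rw [ih (i + 1) j _ (by omega) (by omega) hi1]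
        rw [show (((i + 1 : Nat) : Int) - (j : Int)) = (i : Int) - (j : Int) + 1 by push_cast; ring]

theorem solutionLoop_groups (d : List Int) : solutionLoop d 0 0 [] = groups d := by
  cases d with
  | nil => rw [solutionLoop]; simp [groups]
  | cons x xs =>
    rw [solutionLoop_eq_goGroups (x :: xs) (x :: xs).length 0 0 [] (by simp) (le_refl 0)
      (by simp)]
    simp [groups, goGroups]

-- ===== facts about scanMax =====
theorem scanMax_ge : ∀ (ys : List Int) (t : Int), ∀ z ∈ scanMax t ys, t ≤ z := by
  intro ys
  induction ys with
  | nil => intro t z hz; simp [scanMax] at hz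
  | cons y ys ih =>
    intro t z hz
    simp only [scanMax, List.mem_cons] at hz
    rcases hz with h | h
    · subst h; split <;> omega
    · have := ih (if y > t then y else t) z h
      split at this <;> omega

theorem scanMax_sorted : ∀ (ys : List Int) (t : Int), (scanMax t ys).Sorted (· ≤ ·) := by
  intro ys
  induction ys with
  | nil => intro t; simp only [scanMax]; exact List.sorted_nil
  | cons y ys ih =>
    intro t
    simp only [scanMax, List.sorted_cons]
    exact ⟨fun z hz => scanMax_ge ys _ z hz, ih _⟩

-- ===== goGroups = run counter of the running maxima =====
theorem goGroups_eq_rc : ∀ (ys : List Int) (t c : Int),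
    goGroups t c ys = rc t c (scanMax t ys) := by
  intro ys
  induction ys with
  | nil => intro t c; simp [goGroups, scanMax, rc]
  | cons y ys ih =>
    intro t c
    by_cases hgt : y > t
    · simp only [goGroups, scanMax, if_pos hgt, rc, if_neg (by omega : ¬ y = t)]
      rw [ih]
    · simp only [goGroups, scanMax, if_neg hgt, rc, if_true]
      rw [ih]

-- ===== elements of ddg are strictly above v, so counts are unaffected by the head =====
theorem ddg_gt : ∀ (L : List Int) (v : Int), L.Sorted (· ≤ ·) → (∀ z ∈ L, v ≤ z) →
    ∀ u ∈ ddg v L, v < u := by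
  intro L
  induction L with
  | nil => intro v _ _ u hu; simp [ddg] at hu
  | cons y ys ih =>
    intro v hs hge u hu
    rw [List.sorted_cons] at hs
    by_cases hy : y = v
    · rw [ddg, if_pos hy] at hu
      exact ih v hs.2 (fun z hz => le_trans (hy ▸ hs.1 z hz : v ≤ z) (le_refl z)) u hu
    · have hyv : v < y := lt_of_le_of_ne (hge y (by simp)) (Ne.symm hy)
      rw [ddg, if_neg hy] at hu
      rcases List.mem_cons.mp hu with h | h
      · omega
      · exact lt_trans hyv (ih y hs.2 hs.1 u h)

-- run counter of a sorted list = per-distinct-value occurrence counts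
theorem rc_eq_counts : ∀ (L : List Int) (v c : Int), L.Sorted (· ≤ ·) → (∀ z ∈ L, v ≤ z) →
    rc v c L = (c + (L.count v : Int)) :: (ddg v L).map (fun u => (L.count u : Int)) := by
  intro L
  induction L with
  | nil => intro v c _ _; simp [rc, ddg]
  | cons y ys ih =>
    intro v c hs hge
    rw [List.sorted_cons] at hs
    by_cases hy : y = v
    · subst hy
      have hge' : ∀ z ∈ ys, y ≤ z := hs.1
      rw [rc, if_pos rfl, ddg, if_pos rfl, ih y (c + 1) hs.2 hge']
      have hc : ((y :: ys).count y : Int) = (ys.count y : Int) + 1 := by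
        rw [List.count_cons_self]; push_cast; ring
      rw [hc]
      congr 1
      · ring
      · apply List.map_congr_left
        intro u hu
        have huy : y < u := ddg_gt ys y hs.2 hge' u hu
        rw [List.count_cons_of_ne (by omega)]
    · have hyv : v < y := lt_of_le_of_ne (hge y (by simp)) (Ne.symm hy)
      have hvny : (v ∉ y :: ys) := by
        intro hv
        rcases List.mem_cons.mp hv with h | h
        · omega
        · have := hs.1 v h; omega
      rw [rc, if_neg hy, ddg, if_neg hy, ih y 1 hs.2 hs.1]
      have hc0 : ((y :: ys).count v : Int) = 0 := by
        rw [List.count_eq_zero.mpr hvny]; rfl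
      rw [hc0, List.map_cons]
      congr 1
      · ring
      congr 1
      · rw [List.count_cons_self]; push_cast; ring
      · apply List.map_congr_left
        intro u hu
        have huy : y < u := ddg_gt ys y hs.2 hs.1 u hu
        rw [List.count_cons_of_ne (by omega)]

-- ===== first-occurrence dedup (Set.ofList) of a sorted list is head :: ddg =====
theorem foldl_add_sorted : ∀ (L : List Int) (v : Int) (acc : List Int),
    L.Sorted (· ≤ ·) → (∀ z ∈ L, v ≤ z) → (∀ a ∈ acc ++ [v], a ≤ v) →
    List.foldl PySem.Set.add (acc ++ [v]) L = (acc ++ [v]) ++ ddg v L := by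
  intro L
  induction L with
  | nil => intro v acc _ _ _; simp [ddg]
  | cons y ys ih =>
    intro v acc hs hge hacc
    rw [List.sorted_cons] at hs
    by_cases hy : y = v
    · subst hy
      rw [List.foldl_cons, ddg, if_pos rfl,
        show PySem.Set.add (acc ++ [y]) y = acc ++ [y] by simp [PySem.Set.add]]
      exact ih y acc hs.2 hs.1 hacc
    · have hyv : v < y := lt_of_le_of_ne (hge y (by simp)) (Ne.symm hy)
      have hny : y ∉ acc ++ [v] := fun hmem => absurd (hacc y hmem) (by omega)
      have hnc : PySem.Set.contains (acc ++ [v]) y = false := by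
        simp only [PySem.Set.contains]
        simpa using hny
      rw [List.foldl_cons,
        show PySem.Set.add (acc ++ [v]) y = (acc ++ [v]) ++ [y] by
          simp only [PySem.Set.add, hnc, Bool.false_eq_true, if_false]]
      have hacc' : ∀ a ∈ ((acc ++ [v]) ++ [y]), a ≤ y := by
        intro a ha
        rcases List.mem_append.mp ha with h | h
        · have := hacc a h; omega
        · simp at h; omega
      rw [ih y (acc ++ [v]) hs.2 hs.1 hacc', ddg, if_neg hy]
      simp

theorem ofList_sorted_cons (x : Int) (L : List Int)
    (hs : L.Sorted (· ≤ ·)) (hge : ∀ z ∈ L, x ≤ z) :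
    PySem.Set.ofList (x :: L) = x :: ddg x L := by
  have h0 : PySem.Set.add PySem.Set.empty x = ([] : List Int) ++ [x] := by
    simp [PySem.Set.add, PySem.Set.empty]
  have := foldl_add_sorted L x [] hs hge (by simp)
  simp only [PySem.Set.ofList, List.foldl_cons, h0]
  simpa using this

-- ===== common value: groups d = occurrence counts of the distinct running maxima =====
-- peak list of a days list (B's first loop, as a function of the days list)
def peakL : List Int → List Int
  | [] => []
  | x :: xs => x :: scanMax x xs

theorem groups_eq_peak_counts (d : List Int) :
    groups d = (PySem.Set.ofList (peakL d)).map (fun u => ((peakL d).count u : Int)) := by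
  cases d with
  | nil => simp [groups, peakL, PySem.Set.ofList]
  | cons x xs =>
    have hs := scanMax_sorted xs x
    have hge := scanMax_ge xs x
    rw [groups, goGroups_eq_rc, rc_eq_counts (scanMax x xs) x 1 hs hge,
      show peakL (x :: xs) = x :: scanMax x xs from rfl,
      ofList_sorted_cons x (scanMax x xs) hs hge, List.map_cons]
    congr 1
    · rw [List.count_cons_self]; push_cast; ring
    · apply List.map_congr_left
      intro u hu
      have := ddg_gt (scanMax x xs) x hs hge u hu
      rw [List.count_cons_of_ne (by omega)]

-- ===== B-side: the first foldl builds peakL, the second is PySem.Dict.counter =====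
theorem foldl_peak_step : ∀ (ds : List Int) (m : Int) (acc : List Int), acc ≠ [] →
    PySem.List.pyGetD acc (-1) 0 = m →
    ds.foldl
      (fun (peak : List Int) day =>
        peak ++ [if peak = [] ∨ day > PySem.List.pyGetD peak (-1) 0 then day
                 else PySem.List.pyGetD peak (-1) 0])
      acc = acc ++ scanMax m ds := by
  intro ds
  induction ds with
  | nil => intro m acc _ _; simp [scanMax]
  | cons y ys ih =>
    intro m acc hne hlast
    rw [List.foldl_cons]
    have hcond : (if acc = [] ∨ y > PySem.List.pyGetD acc (-1) 0 then y
        else PySem.List.pyGetD acc (-1) 0) = (if y > m then y else m) := by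
      rw [hlast]
      by_cases h : y > m
      · rw [if_pos (Or.inr h), if_pos h]
      · rw [if_neg (by tauto), if_neg h]
    rw [hcond, ih (if y > m then y else m) (acc ++ [if y > m then y else m]) (by simp)
      (PySem.List.pyGetD_neg_one_append_singleton _ _ _)]
    simp [scanMax]

theorem solution_alt_peak_counts (progresses speeds : List Int) :
    solution_alt progresses speeds =
      (PySem.Set.ofList (peakL ((progresses.zip speeds).map (fun x => pyCeilDay x.1 x.2)))).map
        (fun u => (((peakL ((progresses.zip speeds).map (fun x => pyCeilDay x.1 x.2))).count u : Nat) : Int)) := by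
  show (List.foldl (fun (d : PySem.Dict Int Int) m => d.insert m (d.getD m 0 + 1))
      PySem.Dict.empty
      ((progresses.zip speeds).foldl
        (fun (peak : List Int) x =>
          peak ++ [if peak = [] ∨ pyCeilDay x.1 x.2 > PySem.List.pyGetD peak (-1) 0 then pyCeilDay x.1 x.2
                   else PySem.List.pyGetD peak (-1) 0]) [])).values = _
  rw [show ((progresses.zip speeds).foldl
      (fun (peak : List Int) x =>
        peak ++ [if peak = [] ∨ pyCeilDay x.1 x.2 > PySem.List.pyGetD peak (-1) 0 then pyCeilDay x.1 x.2
                 else PySem.List.pyGetD peak (-1) 0]) [])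
    = (((progresses.zip speeds).map (fun x => pyCeilDay x.1 x.2)).foldl
      (fun (peak : List Int) day =>
        peak ++ [if peak = [] ∨ day > PySem.List.pyGetD peak (-1) 0 then day
                 else PySem.List.pyGetD peak (-1) 0]) [])
    from by rw [List.foldl_map]]
  have hpeak : (((progresses.zip speeds).map (fun x => pyCeilDay x.1 x.2)).foldl
      (fun (peak : List Int) day =>
        peak ++ [if peak = [] ∨ day > PySem.List.pyGetD peak (-1) 0 then day
                 else PySem.List.pyGetD peak (-1) 0]) [])
      = peakL ((progresses.zip speeds).map (fun x => pyCeilDay x.1 x.2)) := by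
    cases h : (progresses.zip speeds).map (fun x => pyCeilDay x.1 x.2) with
    | nil => simp [peakL]
    | cons x xs =>
      rw [List.foldl_cons,
        show (([] : List Int) ++ [if ([] : List Int) = [] ∨ x > PySem.List.pyGetD [] (-1) 0 then x
            else PySem.List.pyGetD [] (-1) 0]) = [x] by simp,
        foldl_peak_step xs x [x] (by simp)
          (by simpa using PySem.List.pyGetD_neg_one_append_singleton (xs := ([] : List Int)) (x := x) (d := 0))]
      simp [peakL]
  rw [hpeak]
  rw [PySem.Dict.foldl_insert_getD_add_one_eq_counter]
  simp only [PySem.Dict.values, PySem.Dict.items_counter, List.map_map]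
  rfl

-- ===== VERDICT (by name: the statement is the Claim_ definition above) =====
theorem solution_spec : Claim_equal_solution := by
  intro progresses speeds _ _
  unfold Spec_solution solution
  rw [solutionLoop_groups, solution_alt_peak_counts, groups_eq_peak_counts]
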